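-- pv_equiv track=rewrite | github.com/Wawanahayy/discord-chat | test.py | strip_greetings
-- ===== SOURCE A (Python) =====
-- BANNED_GREETINGS = [
--     "good morning", "good afternoon", "good evening",
--     "selamat pagi", "selamat siang", "selamat malam"
-- ]
--
-- def strip_greetings(t: str) -> str:
--     s = t.strip()
--     low = s.lower()
--     for g in BANNED_GREETINGS:
--         if low.startswith(g):
--             s = s[len(g):].lstrip(" ,.-!?")
--             break
--     return s
-- ===== SOURCE B (Python) =====
-- # B: two-stage family match ("good "/"selamat " head, then tail word), nested
-- # loops with early return, instead of A's flat startswith scan over full greetings.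
-- _PUNCT = " ,.-!?"
-- _FAMILIES = [
--     ("good ", ("morning", "afternoon", "evening")),
--     ("selamat ", ("pagi", "siang", "malam")),
-- ]
--
-- def strip_greetings(t: str) -> str:
--     s = t.strip()
--     low = s.lower()
--     for head, tails in _FAMILIES:
--         if low.startswith(head):
--             rest = low[len(head):]
--             for tail in tails:
--                 if rest[:len(tail)] == tail:
--                     return s[len(head) + len(tail):].lstrip(_PUNCT)
--     return s
-- ===== Notes on version B (the rewrite author's own statement) =====
-- stated objective: alternative
-- what changed: B factors the six greetings into two families with shared heads ('good ', 'selamat '): an outer loop matches the head with startswith, an inner loop compares the sliced tail word by slice-equality and returns early, replacing A's flat in-order startswith scan over full greetings with break and in-place reassignment; correct because the two heads are mutually exclusive and head+tail recomposes each full greeting.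
import Mathlib
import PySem

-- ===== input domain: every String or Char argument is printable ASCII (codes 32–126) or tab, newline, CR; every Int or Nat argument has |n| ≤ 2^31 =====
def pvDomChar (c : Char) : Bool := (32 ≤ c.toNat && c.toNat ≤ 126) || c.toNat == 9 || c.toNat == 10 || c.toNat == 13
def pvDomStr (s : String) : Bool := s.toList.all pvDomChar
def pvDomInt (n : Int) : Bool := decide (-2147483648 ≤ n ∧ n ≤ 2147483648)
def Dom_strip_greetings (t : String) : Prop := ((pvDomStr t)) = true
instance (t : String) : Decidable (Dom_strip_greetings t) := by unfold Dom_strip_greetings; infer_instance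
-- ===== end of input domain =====

-- B replaces A's flat startswith scan over the six full greetings by a two-stage
-- family match (head word, then tail word) with early return (objective: alternative).

-- ===== PORT A =====
-- Python's s.lstrip(" ,.-!?"): drop leading chars from that set (hand port, exact)
def pvLstripPunct (cs : List Char) : List Char :=
  cs.dropWhile (fun c => (" ,.-!?".toList).contains c)

def pvBanned : List (List Char) :=
  ["good morning".toList, "good afternoon".toList, "good evening".toList,
   "selamat pagi".toList, "selamat siang".toList, "selamat malam".toList]

-- A's for-loop with break: the first greeting low starts with wins
def pvLoopA : List (List Char) → List Char → List Char → List Char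
  | [], s, _ => s
  | g :: rest, s, low =>
    if PySem.Chars.startswith low g then
      pvLstripPunct (PySem.List.slice s (some (g.length : Int)) none)
    else pvLoopA rest s low

def strip_greetings (t : String) : String :=
  let s := PySem.Chars.strip t.toList
  let low := PySem.Chars.lower s
  String.ofList (pvLoopA pvBanned s low)

-- ===== PORT B =====
-- B's lstrip(" ,.-!?") written as its own recursion over the leading chars
def pvPunct (c : Char) : Bool :=
  c = ' ' || c = ',' || c = '.' || c = '-' || c = '!' || c = '?'

def pvStripLead : List Char → List Char
  | [] => []
  | c :: cs => if pvPunct c then pvStripLead cs else c :: cs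

def pvFamilies : List (List Char × List (List Char)) :=
  [("good ".toList, ["morning".toList, "afternoon".toList, "evening".toList]),
   ("selamat ".toList, ["pagi".toList, "siang".toList, "malam".toList])]

-- inner loop: rest[:len(tail)] == tail, early return of the stripped remainder
def pvTailScan : Nat → List (List Char) → List Char → List Char → Option (List Char)
  | _, [], _, _ => none
  | hlen, tl :: more, s, rlow =>
    if PySem.List.slice rlow none (some ((tl.length : Nat) : Int)) = tl then
      some (pvStripLead (PySem.List.slice s (some (((hlen + tl.length : Nat)) : Int)) none))
    else pvTailScan hlen more s rlow

-- outer loop over the families: startswith on the head, then the tail scan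
def pvFamScan : List (List Char × List (List Char)) → List Char → List Char → Option (List Char)
  | [], _, _ => none
  | (head, tails) :: more, s, low =>
    if PySem.Chars.startswith low head then
      match pvTailScan head.length tails s
          (PySem.List.slice low (some ((head.length : Nat) : Int)) none) with
      | some r => some r
      | none => pvFamScan more s low
    else pvFamScan more s low

def strip_greetings_alt (t : String) : String :=
  let s := PySem.Chars.strip t.toList
  let low := PySem.Chars.lower s
  String.ofList ((pvFamScan pvFamilies s low).getD s)

-- ===== PRECONDITION & SPEC =====
def Spec_strip_greetings (t : String) (out : String) : Prop := out = strip_greetings_alt t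
instance (t : String) (out : String) : Decidable (Spec_strip_greetings t out) := by unfold Spec_strip_greetings; infer_instance

-- ===== CLAIM (what is proved, stated in full; the proofs are below) =====
def Claim_equal_strip_greetings : Prop := ∀ (t : String), Dom_strip_greetings t → Spec_strip_greetings t (strip_greetings t)

-- ===== LEMMAS AND PROOFS =====

def gdL : List Char := "good ".toList
def slL : List Char := "selamat ".toList
def moL : List Char := "morning".toList
def afL : List Char := "afternoon".toList
def evL : List Char := "evening".toList
def paL : List Char := "pagi".toList
def siL : List Char := "siang".toList
def maL : List Char := "malam".toList

-- the two strips agree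
lemma pvStripLead_eq (cs : List Char) : pvStripLead cs = pvLstripPunct cs := by
  induction cs with
  | nil => rfl
  | cons c cs ih =>
    have hc : ((" ,.-!?".toList).contains c) = pvPunct c := by
      simp [pvPunct, Bool.or_assoc]
    simp only [pvStripLead, pvLstripPunct, List.dropWhile]
    rw [hc]
    by_cases h : pvPunct c = true
    · simp [h, ih, pvLstripPunct]
    · simp [h]

-- splitting a prefix at a concatenation
lemma pv_prefix_append (a b l : List Char) :
    (a ++ b <+: l) ↔ (a <+: l ∧ b <+: l.drop a.length) := by
  constructor
  · rintro ⟨t, ht⟩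
    rw [List.append_assoc] at ht
    subst ht
    constructor
    · exact ⟨b ++ t, rfl⟩
    · simp
  · rintro ⟨⟨t1, ht1⟩, ⟨t2, ht2⟩⟩
    subst ht1
    simp at ht2
    exact ⟨t2, by rw [List.append_assoc, ht2]⟩

lemma pv_take_eq_iff {g low : List Char} : low.take g.length = g ↔ g <+: low := by
  constructor
  · intro h; exact h ▸ List.take_prefix g.length low
  · intro h; exact (List.prefix_iff_eq_take.mp h).symm

-- two incomparable greetings cannot both be prefixes of the same string
lemma pv_excl {g g' low : List Char} (hgg : ¬ g <+: g') (hg'g : ¬ g' <+: g)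
    (h : g <+: low) : ¬ g' <+: low :=
  fun h' => (List.prefix_or_prefix_of_prefix h h').elim hgg hg'g

-- A's loop as a chain of prefix tests over the six full greetings
lemma pv_A_char (s low : List Char) : pvLoopA pvBanned s low =
    if gdL ++ moL <+: low then pvLstripPunct (s.drop 12)
    else if gdL ++ afL <+: low then pvLstripPunct (s.drop 14)
    else if gdL ++ evL <+: low then pvLstripPunct (s.drop 12)
    else if slL ++ paL <+: low then pvLstripPunct (s.drop 12)
    else if slL ++ siL <+: low then pvLstripPunct (s.drop 13)
    else if slL ++ maL <+: low then pvLstripPunct (s.drop 13)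
    else s := by
  simp only [pvLoopA, pvBanned, PySem.Chars.startswith_iff,
    PySem.List.slice_from_natCast]
  rw [show ("good morning".toList).length = 12 from by decide,
    show ("good afternoon".toList).length = 14 from by decide,
    show ("good evening".toList).length = 12 from by decide,
    show ("selamat pagi".toList).length = 12 from by decide,
    show ("selamat siang".toList).length = 13 from by decide,
    show ("selamat malam".toList).length = 13 from by decide,
    show gdL ++ moL = "good morning".toList from by decide,
    show gdL ++ afL = "good afternoon".toList from by decide,
    show gdL ++ evL = "good evening".toList from by decide,
    show slL ++ paL = "selamat pagi".toList from by decide,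
    show slL ++ siL = "selamat siang".toList from by decide,
    show slL ++ maL = "selamat malam".toList from by decide]

-- B's nested loops as nested chains over head and tail prefixes
lemma pv_B_char (s low : List Char) : (pvFamScan pvFamilies s low).getD s =
    if gdL <+: low then
      (if (low.drop 5).take 7 = moL then pvStripLead (s.drop 12)
       else if (low.drop 5).take 9 = afL then pvStripLead (s.drop 14)
       else if (low.drop 5).take 7 = evL then pvStripLead (s.drop 12)
       else if slL <+: low then
         (if (low.drop 8).take 4 = paL then pvStripLead (s.drop 12)
          else if (low.drop 8).take 5 = siL then pvStripLead (s.drop 13)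
          else if (low.drop 8).take 5 = maL then pvStripLead (s.drop 13)
          else s)
       else s)
    else if slL <+: low then
      (if (low.drop 8).take 4 = paL then pvStripLead (s.drop 12)
       else if (low.drop 8).take 5 = siL then pvStripLead (s.drop 13)
       else if (low.drop 8).take 5 = maL then pvStripLead (s.drop 13)
       else s)
    else s := by
  simp only [pvFamScan, pvTailScan, pvFamilies, PySem.Chars.startswith_iff,
    PySem.List.slice_from_natCast, PySem.List.slice_to_natCast]
  rw [show ("good ".toList).length = 5 from by decide,
    show ("selamat ".toList).length = 8 from by decide,
    show ("morning".toList).length = 7 from by decide,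
    show ("afternoon".toList).length = 9 from by decide,
    show ("evening".toList).length = 7 from by decide,
    show ("pagi".toList).length = 4 from by decide,
    show ("siang".toList).length = 5 from by decide,
    show ("malam".toList).length = 5 from by decide]
  simp only [gdL, slL, moL, afL, evL, paL, siL, maL]
  split_ifs <;> rfl

-- translating B's tail test into A's full-greeting test, under the head
lemma pv_tail_iff {head tl low : List Char} {h t : Nat}
    (hh : head.length = h) (ht : tl.length = t) (hhd : head <+: low) :
    ((low.drop h).take t = tl) ↔ (head ++ tl <+: low) := by
  subst hh; subst ht
  rw [pv_take_eq_iff, pv_prefix_append]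
  exact ⟨fun hp => ⟨hhd, hp⟩, fun hp => hp.2⟩

lemma pv_head_of_full {head tl low : List Char} (h : head ++ tl <+: low) :
    head <+: low := ((head.prefix_append tl).trans h)

lemma pv_core (s low : List Char) :
    (pvFamScan pvFamilies s low).getD s = pvLoopA pvBanned s low := by
  rw [pv_A_char, pv_B_char]
  simp only [pvStripLead_eq]
  by_cases hg : gdL <+: low
  · have hns : ¬ slL <+: low := pv_excl (by decide) (by decide) hg
    rw [if_pos hg]
    have e1 : ((low.drop 5).take 7 = moL) ↔ (gdL ++ moL <+: low) :=
      pv_tail_iff (by decide) (by decide) hg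
    have e2 : ((low.drop 5).take 9 = afL) ↔ (gdL ++ afL <+: low) :=
      pv_tail_iff (by decide) (by decide) hg
    have e3 : ((low.drop 5).take 7 = evL) ↔ (gdL ++ evL <+: low) :=
      pv_tail_iff (by decide) (by decide) hg
    simp only [e1, e2, e3]
    have h4 : ¬ slL ++ paL <+: low := fun h => hns (pv_head_of_full h)
    have h5 : ¬ slL ++ siL <+: low := fun h => hns (pv_head_of_full h)
    have h6 : ¬ slL ++ maL <+: low := fun h => hns (pv_head_of_full h)
    by_cases h1 : gdL ++ moL <+: low
    · rw [if_pos h1, if_pos h1]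
    · rw [if_neg h1, if_neg h1]
      by_cases h2 : gdL ++ afL <+: low
      · rw [if_pos h2, if_pos h2]
      · rw [if_neg h2, if_neg h2]
        by_cases h3 : gdL ++ evL <+: low
        · rw [if_pos h3, if_pos h3]
        · rw [if_neg h3, if_neg h3, if_neg hns, if_neg h4, if_neg h5, if_neg h6]
  · have h1 : ¬ gdL ++ moL <+: low := fun h => hg (pv_head_of_full h)
    have h2 : ¬ gdL ++ afL <+: low := fun h => hg (pv_head_of_full h)
    have h3 : ¬ gdL ++ evL <+: low := fun h => hg (pv_head_of_full h)
    rw [if_neg hg, if_neg h1, if_neg h2, if_neg h3]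
    by_cases hs : slL <+: low
    · rw [if_pos hs]
      have e4 : ((low.drop 8).take 4 = paL) ↔ (slL ++ paL <+: low) :=
        pv_tail_iff (by decide) (by decide) hs
      have e5 : ((low.drop 8).take 5 = siL) ↔ (slL ++ siL <+: low) :=
        pv_tail_iff (by decide) (by decide) hs
      have e6 : ((low.drop 8).take 5 = maL) ↔ (slL ++ maL <+: low) :=
        pv_tail_iff (by decide) (by decide) hs
      simp only [e4, e5, e6]
    · have h4 : ¬ slL ++ paL <+: low := fun h => hs (pv_head_of_full h)
      have h5 : ¬ slL ++ siL <+: low := fun h => hs (pv_head_of_full h)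
      have h6 : ¬ slL ++ maL <+: low := fun h => hs (pv_head_of_full h)
      rw [if_neg hs, if_neg h4, if_neg h5, if_neg h6]

-- ===== VERDICT (by name: the statement is the Claim_ definition above) =====
theorem strip_greetings_spec : Claim_equal_strip_greetings := by
  intro t _
  show strip_greetings t = strip_greetings_alt t
  exact (congrArg String.ofList (pv_core _ _)).symm
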